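-- pv_equiv track=rewrite | github.com/tomadams2909/ai-dev-assistant | orchestrator.py | _strip_think_stream
-- ===== SOURCE A (Python) =====
-- from typing import Iterator
--
-- def _strip_think_stream(token_stream: Iterator[str]) -> Iterator[str]:
--     """
--     Filter <think>…</think> blocks out of a streaming token iterator.
--
--     DeepSeek-r1 emits chain-of-thought inside <think> tags before the
--     answer.  We buffer until we know whether the stream starts with
--     <think>, discard everything inside that block, then yield the rest
--     token-by-token with no extra latency.
--     """
--     OPEN  = "<think>"
--     CLOSE = "</think>"
--
--     buf      = ""
--     in_think = False
--     decided  = False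
--
--     for token in token_stream:
--         if not decided:
--             buf += token
--             if buf.startswith(OPEN):
--                 in_think = True
--                 decided  = True
--                 buf      = buf[len(OPEN):]
--             elif len(buf) >= len(OPEN) or not OPEN.startswith(buf):
--                 # Buffer is long enough — no think tag is coming
--                 decided  = True
--                 in_think = False
--                 yield buf
--                 buf = ""
--             # else: still accumulating — could still be start of <think>
--         elif in_think:
--             buf += token
--             idx = buf.find(CLOSE)
--             if idx != -1:
--                 in_think = False
--                 buf = buf[idx + len(CLOSE):].lstrip("\n ")
--                 if buf:
--                     yield buf
--                     buf = ""
--         else: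
--             yield token
--
--     # Flush anything left after the loop (only if we're not mid-think)
--     if buf and not in_think:
--         yield buf
-- ===== SOURCE B (Python) =====
-- def _strip_think_stream(token_stream):
--     """Same output; three explicit phases, and inside a think block only a
--     bounded tail window of already-searched text is kept and re-searched."""
--     OPEN = "<think>"
--     CLOSE = "</think>"
--     it = iter(token_stream)
--     buf = ""
--     for token in it:
--         buf += token
--         if buf.startswith(OPEN):
--             # skip the think block, searching only a bounded tail window
--             tail = buf[len(OPEN):]
--             for token in it:
--                 s = tail + token
--                 idx = s.find(CLOSE)
--                 if idx != -1:
--                     rest = s[idx + len(CLOSE):].lstrip("\n ")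
--                     if rest:
--                         yield rest
--                     yield from it
--                     return
--                 tail = s[-(len(CLOSE) - 1):]
--             return  # stream ended inside the think block
--         if len(buf) >= len(OPEN) or not OPEN.startswith(buf):
--             yield buf
--             yield from it
--             return
--     if buf:
--         yield buf
-- ===== Notes on version B (the rewrite author's own statement) =====
-- stated objective: alternative
-- what changed: Instead of one flag-driven fold over (buf, in_think, decided) state that appends every token to one growing buffer and re-searches the whole buffer for '</think>' at each step, B runs three explicit phases (decide / skip-think / pass-through) and inside the think block keeps only a bounded 7-character tail window of already-searched text, searching each token's text once.
import Mathlib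
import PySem

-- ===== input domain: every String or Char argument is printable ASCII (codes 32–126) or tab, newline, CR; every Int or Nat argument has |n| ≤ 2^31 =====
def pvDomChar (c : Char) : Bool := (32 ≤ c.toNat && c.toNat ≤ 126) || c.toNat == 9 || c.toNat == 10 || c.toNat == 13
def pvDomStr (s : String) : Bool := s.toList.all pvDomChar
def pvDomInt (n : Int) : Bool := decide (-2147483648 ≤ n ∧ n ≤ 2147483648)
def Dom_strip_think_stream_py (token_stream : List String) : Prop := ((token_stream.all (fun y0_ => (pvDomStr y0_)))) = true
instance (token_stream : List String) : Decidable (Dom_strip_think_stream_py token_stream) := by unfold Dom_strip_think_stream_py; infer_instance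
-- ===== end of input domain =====

-- B: three explicit phases instead of A's flag-driven fold; inside the think block
-- only a bounded tail window of already-searched text is kept and re-searched.

-- ===== PORT A =====
-- helpers: the two tag constants, and lstrip("\n ") ported by hand (exact: drop leading '\n'/' ' chars)
def pvOPEN : List Char := ['<', 't', 'h', 'i', 'n', 'k', '>']
def pvCLOSE : List Char := ['<', '/', 't', 'h', 'i', 'n', 'k', '>']
def pvLstripNlSp (s : List Char) : List Char := s.dropWhile (fun c => c == '\n' || c == ' ')

-- one iteration of A's for-loop over the state (out, buf, in_think, decided)
def stripA_step (st : List String × List Char × Bool × Bool) (token : String) :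
    List String × List Char × Bool × Bool :=
  let (out, buf, in_think, decided) := st
  if !decided then
    let buf := buf ++ token.toList
    if PySem.Chars.startswith buf pvOPEN then
      (out, buf.drop pvOPEN.length, true, true)
    else if decide (pvOPEN.length ≤ buf.length) || !(PySem.Chars.startswith pvOPEN buf) then
      (out ++ [String.mk buf], [], false, true)
    else
      (out, buf, in_think, decided)
  else if in_think then
    let buf := buf ++ token.toList
    let idx := PySem.Chars.find buf pvCLOSE
    if idx ≠ -1 then
      let buf := pvLstripNlSp (buf.drop (idx.toNat + pvCLOSE.length))
      if !buf.isEmpty then (out ++ [String.mk buf], [], false, true)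
      else (out, buf, false, true)
    else (out, buf, in_think, decided)
  else
    (out ++ [token], buf, in_think, decided)

def strip_think_stream_py (token_stream : List String) : List String :=
  let st := token_stream.foldl stripA_step ([], [], false, false)
  if !st.2.1.isEmpty && !st.2.2.1 then st.1 ++ [String.mk st.2.1] else st.1

-- ===== PORT B =====
-- phase 2 of Source B: inside the think block; `tail` is the bounded unsearched window
def stripB_think (tokens : List String) (tail : List Char) : List String :=
  match tokens with
  | [] => []
  | token :: it =>
    let s := tail ++ token.toList
    let idx := PySem.Chars.find s pvCLOSE
    if idx ≠ -1 then
      let rest := pvLstripNlSp (s.drop (idx.toNat + pvCLOSE.length))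
      (if rest.isEmpty then [] else [String.mk rest]) ++ it
    else
      stripB_think it (s.drop (s.length - (pvCLOSE.length - 1)))

-- phase 1 of Source B: deciding whether the stream starts with <think>
def stripB_decide (tokens : List String) (buf : List Char) : List String :=
  match tokens with
  | [] => if buf.isEmpty then [] else [String.mk buf]
  | token :: it =>
    let buf := buf ++ token.toList
    if PySem.Chars.startswith buf pvOPEN then
      stripB_think it (buf.drop pvOPEN.length)
    else if decide (pvOPEN.length ≤ buf.length) || !(PySem.Chars.startswith pvOPEN buf) then
      String.mk buf :: it
    else
      stripB_decide it buf

def strip_think_stream_py_alt (token_stream : List String) : List String :=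
  stripB_decide token_stream []

-- ===== PRECONDITION & SPEC =====
def Spec_strip_think_stream_py (token_stream : List String) (out : List String) : Prop := out = strip_think_stream_py_alt token_stream
instance (token_stream : List String) (out : List String) : Decidable (Spec_strip_think_stream_py token_stream out) := by unfold Spec_strip_think_stream_py; infer_instance

-- ===== CLAIM (what is proved, stated in full; the proofs are below) =====
def Claim_equal_strip_think_stream_py : Prop := ∀ (token_stream : List String), Dom_strip_think_stream_py token_stream → Spec_strip_think_stream_py token_stream (strip_think_stream_py token_stream)

-- ===== LEMMAS AND PROOFS =====

-- A's final flush, as a function of the loop state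
def pvAfin (st : List String × List Char × Bool × Bool) : List String :=
  if !st.2.1.isEmpty && !st.2.2.1 then st.1 ++ [String.mk st.2.1] else st.1

theorem pv_infix_iff_drop (p s : List Char) : p <:+: s ↔ ∃ j, p <+: s.drop j := by
  rw [← PySem.Chars.isIn_iff_infix, ← PySem.Chars.exists_prefix_drop_iff_isIn]

theorem pv_prefix_of_prefix_append (p x y : List Char) (h : p <+: x ++ y)
    (hl : p.length ≤ x.length) : p <+: x := by
  rw [List.prefix_iff_eq_take] at h ⊢
  rwa [List.take_append_of_le_length hl] at h

-- the crux: with no occurrence of pvCLOSE starting before index d,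
-- searching the whole buffer equals searching its tail from d, shifted
theorem pv_find_shift (sA : List Char) (d : Nat) (_hd : d ≤ sA.length)
    (hno : ∀ i < d, ¬ pvCLOSE <+: sA.drop i) :
    PySem.Chars.find sA pvCLOSE =
      if PySem.Chars.find (sA.drop d) pvCLOSE = -1 then -1
      else (d : Int) + PySem.Chars.find (sA.drop d) pvCLOSE := by
  by_cases hinf : pvCLOSE <:+: sA.drop d
  · have hB : 0 ≤ PySem.Chars.find (sA.drop d) pvCLOSE :=
      (PySem.Chars.find_nonneg_iff _ _).2 hinf
    obtain ⟨hBj, hBmin⟩ := PySem.Chars.find_spec hB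
    set j := (PySem.Chars.find (sA.drop d) pvCLOSE).toNat with hjdef
    have hBj' : pvCLOSE <+: sA.drop (d + j) := by rw [← List.drop_drop]; exact hBj
    have hA : 0 ≤ PySem.Chars.find sA pvCLOSE := by
      refine (PySem.Chars.find_nonneg_iff _ _).2 ?_
      exact (pv_infix_iff_drop _ _).2 ⟨d + j, hBj'⟩
    obtain ⟨hAk, hAmin⟩ := PySem.Chars.find_spec hA
    set k := (PySem.Chars.find sA pvCLOSE).toNat with hkdef
    have hk1 : k ≤ d + j := by
      by_contra h
      exact hAmin (d + j) (by omega) hBj'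
    have hkd : d ≤ k := by
      by_contra h
      exact hno k (by omega) hAk
    have hk2 : j ≤ k - d := by
      by_contra h
      refine hBmin (k - d) (by omega) ?_
      rw [List.drop_drop, Nat.add_sub_cancel' hkd]
      exact hAk
    rw [if_neg (by omega)]
    omega
  · have hA : ¬ pvCLOSE <:+: sA := by
      intro h
      obtain ⟨i, hi⟩ := (pv_infix_iff_drop _ _).1 h
      rcases Nat.lt_or_ge i d with hlt | hge
      · exact hno i hlt hi
      · refine hinf ((pv_infix_iff_drop _ _).2 ⟨i - d, ?_⟩)
        rwa [List.drop_drop, Nat.add_sub_cancel' hge]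
    rw [if_pos ((PySem.Chars.find_eq_neg_one_iff _ _).2 hinf)]
    exact (PySem.Chars.find_eq_neg_one_iff _ _).2 hA

-- after the think block (or after deciding no tag), A passes tokens through
theorem pv_foldl_pass (toks : List String) (out : List String) :
    toks.foldl stripA_step (out, ([] : List Char), false, true) = (out ++ toks, [], false, true) := by
  induction toks generalizing out with
  | nil => simp
  | cons t it ih =>
    simp only [List.foldl_cons, stripA_step]
    simpa using ih (out ++ [t])

-- the think phase: A's growing buffer vs B's bounded window
theorem pv_foldl_think (toks : List String) (bufA : List Char) (d : Nat) (out : List String)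
    (hd : d ≤ bufA.length)
    (hno : ∀ i < d, ¬ pvCLOSE <+: bufA.drop i)
    (h7 : d = 0 ∨ d + 7 ≤ bufA.length) :
    pvAfin (toks.foldl stripA_step (out, bufA, true, true)) =
      out ++ stripB_think toks (bufA.drop d) := by
  induction toks generalizing bufA d out with
  | nil => simp [stripB_think, pvAfin]
  | cons token it ih =>
    have hd' : d ≤ (bufA ++ token.toList).length := by simp; omega
    have hdropA : bufA.drop d ++ token.toList = (bufA ++ token.toList).drop d :=
      (List.drop_append_of_le_length hd).symm
    have hnoA : ∀ i < d, ¬ pvCLOSE <+: (bufA ++ token.toList).drop i := by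
      intro i hi hp
      rcases h7 with h0 | h7
      · omega
      · refine hno i hi (pv_prefix_of_prefix_append _ _ token.toList ?_ ?_)
        · rwa [List.drop_append_of_le_length (by omega)] at hp
        · simp [pvCLOSE]; omega
    have hfind := pv_find_shift (bufA ++ token.toList) d hd' hnoA
    by_cases hcaseB : PySem.Chars.find ((bufA ++ token.toList).drop d) pvCLOSE = -1
    · -- not found: A keeps the whole buffer, B keeps a bounded window
      rw [if_pos hcaseB] at hfind
      simp only [List.foldl_cons, stripA_step, stripB_think, hdropA, hfind, hcaseB,
        ne_eq, not_true_eq_false, if_false, Bool.not_true, Bool.false_eq_true, reduceIte]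
      rw [List.drop_drop]
      have hnone : ¬ pvCLOSE <:+: (bufA ++ token.toList) :=
        (PySem.Chars.find_eq_neg_one_iff _ _).1 hfind
      refine ih (bufA ++ token.toList)
        (d + (((bufA ++ token.toList).drop d).length - (pvCLOSE.length - 1))) out
        ?_ ?_ ?_
      · simp [pvCLOSE]; omega
      · intro i _ hp
        exact hnone ((pv_infix_iff_drop _ _).2 ⟨i, hp⟩)
      · rcases Nat.lt_or_ge ((bufA ++ token.toList).drop d).length 8 with hsmall | hbig
        · have h0 : ((bufA ++ token.toList).drop d).length - (pvCLOSE.length - 1) = 0 := by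
            simp only [pvCLOSE] at *; simp at *; omega
          rw [h0]
          rcases h7 with h0' | h7'
          · left; omega
          · right; simp; omega
        · right; simp only [pvCLOSE] at *; simp at *; omega
    · -- found: idx_A = d + idx_B, tails beyond the match coincide
      have hgeB : 0 ≤ PySem.Chars.find ((bufA ++ token.toList).drop d) pvCLOSE := by
        have := PySem.Chars.neg_one_le_find ((bufA ++ token.toList).drop d) pvCLOSE
        omega
      rw [if_neg hcaseB] at hfind
      have hneA : ¬ ((d : Int) + PySem.Chars.find ((bufA ++ token.toList).drop d) pvCLOSE = -1) := by
        omega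
      have hsame :
          (bufA ++ token.toList).drop
              (((d : Int) + PySem.Chars.find ((bufA ++ token.toList).drop d) pvCLOSE).toNat + pvCLOSE.length) =
            ((bufA ++ token.toList).drop d).drop
              ((PySem.Chars.find ((bufA ++ token.toList).drop d) pvCLOSE).toNat + pvCLOSE.length) := by
        rw [List.drop_drop]
        congr 1
        omega
      simp only [List.foldl_cons, stripA_step, stripB_think, hdropA, hfind, hsame,
        ne_eq, hneA, hcaseB, not_false_eq_true, if_true, Bool.not_true, Bool.not_false,
        Bool.false_eq_true, Bool.true_eq_false, reduceIte]
      by_cases hempty : (pvLstripNlSp (((bufA ++ token.toList).drop d).drop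
          ((PySem.Chars.find ((bufA ++ token.toList).drop d) pvCLOSE).toNat + pvCLOSE.length))).isEmpty
      · rw [List.isEmpty_iff] at hempty
        simp only [hempty, List.isEmpty_nil, Bool.not_true, Bool.false_eq_true, reduceIte]
        rw [pv_foldl_pass]
        simp [pvAfin]
      · simp only [Bool.not_eq_true] at hempty
        simp only [hempty, Bool.not_false, reduceIte]
        rw [pv_foldl_pass]
        simp [pvAfin]

-- the deciding phase: both sides take the same branches token by token
theorem pv_foldl_decide (toks : List String) (buf : List Char) (out : List String) :
    pvAfin (toks.foldl stripA_step (out, buf, false, false)) = out ++ stripB_decide toks buf := by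
  induction toks generalizing buf out with
  | nil =>
    simp only [List.foldl_nil, stripB_decide, pvAfin]
    by_cases h : buf.isEmpty <;> simp [h]
  | cons token it ih =>
    by_cases h1 : PySem.Chars.startswith (buf ++ token.toList) pvOPEN
    · simp only [List.foldl_cons, stripA_step, stripB_decide, h1, if_pos rfl,
        Bool.not_false, Bool.not_true, Bool.false_eq_true, if_false, if_true]
      have := pv_foldl_think it ((buf ++ token.toList).drop pvOPEN.length) 0 out
        (Nat.zero_le _) (by intro i hi; omega) (Or.inl rfl)
      simpa using this
    · by_cases h2 : (decide (pvOPEN.length ≤ (buf ++ token.toList).length)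
          || !(PySem.Chars.startswith pvOPEN (buf ++ token.toList))) = true
      · simp only [List.foldl_cons, stripA_step, stripB_decide, h1, h2,
          Bool.false_eq_true, if_false, if_true, Bool.not_false]
        rw [pv_foldl_pass]
        simp [pvAfin]
      · simp only [List.foldl_cons, stripA_step, stripB_decide, h1, h2,
          Bool.false_eq_true, if_false, Bool.not_false]
        exact ih _ _

-- ===== VERDICT (by name: the statement is the Claim_ definition above) =====
theorem strip_think_stream_py_spec : Claim_equal_strip_think_stream_py := by
  intro ts _
  show strip_think_stream_py ts = strip_think_stream_py_alt ts
  have := pv_foldl_decide ts [] []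
  simpa [strip_think_stream_py, strip_think_stream_py_alt, pvAfin] using this
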